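-- pv_equiv track=rewrite | github.com/magdasta/golem-verificator-experiments | classification/optical_comparision/chessboard.py | get_crop_boxes
-- ===== SOURCE A (Python) =====
-- BOX_SIZE_X = 200
--
-- BOX_SIZE_Y = 200
--
-- def get_upper_left_corners(width, height):
--     return [(x, y) for x in range(0, width, BOX_SIZE_X) for y in range(0, height, BOX_SIZE_Y) if ( ( x // BOX_SIZE_X ) % 2 ) == ( ( y // BOX_SIZE_Y ) % 2 )]
--
-- def get_crop_boxes(size):
--     width, height = size
--     upper_left_corners = get_upper_left_corners(width, height)
--     results = []
--     for (left, top) in upper_left_corners: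
--         right = min(left + BOX_SIZE_X, width)
--         bottom = min(top + BOX_SIZE_Y, height)
--         results.append((left, top, right, bottom))
--     return results
-- ===== SOURCE B (Python) =====
-- BOX_SIZE_X = 200
--
-- BOX_SIZE_Y = 200
--
-- def get_crop_boxes(size):
--     width, height = size
--     boxes = []
--     for x in range(0, width, BOX_SIZE_X):
--         offset = 0 if (x // BOX_SIZE_X) % 2 == 0 else BOX_SIZE_Y
--         for y in range(offset, height, 2 * BOX_SIZE_Y):
--             boxes.append((x, y, min(x + BOX_SIZE_X, width), min(y + BOX_SIZE_Y, height)))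
--     return boxes
-- ===== Notes on version B (the rewrite author's own statement) =====
-- stated objective: faster
-- what changed: B enumerates the checkerboard cells directly in one pass (odd columns start the y loop at BOX_SIZE_Y and stride 2*BOX_SIZE_Y), instead of A's build-all-corners-then-filter-by-parity followed by a second pass that clips the boxes.
import Mathlib
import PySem

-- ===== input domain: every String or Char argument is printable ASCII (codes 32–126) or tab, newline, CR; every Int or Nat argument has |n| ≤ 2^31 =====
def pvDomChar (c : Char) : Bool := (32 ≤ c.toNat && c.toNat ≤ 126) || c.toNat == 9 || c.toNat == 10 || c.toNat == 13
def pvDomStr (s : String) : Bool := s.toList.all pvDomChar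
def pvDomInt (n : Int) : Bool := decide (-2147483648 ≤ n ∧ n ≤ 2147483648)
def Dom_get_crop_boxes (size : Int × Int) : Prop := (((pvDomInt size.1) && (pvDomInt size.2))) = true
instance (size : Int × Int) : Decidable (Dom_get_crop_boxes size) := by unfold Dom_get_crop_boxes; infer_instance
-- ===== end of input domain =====

-- B merges the two passes and enumerates only the checkerboard cells directly (odd
-- columns start y at BOX_SIZE_Y with stride 2*BOX_SIZE_Y), instead of building all
-- grid corners, filtering by parity, and clipping in a second loop.

-- ===== PORT A =====
def pvBOX_SIZE_X : Int := 200
def pvBOX_SIZE_Y : Int := 200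

def get_upper_left_corners (width height : Int) : List (Int × Int) :=
  (PySem.List.pyRange 0 width pvBOX_SIZE_X).flatMap (fun x =>
    ((PySem.List.pyRange 0 height pvBOX_SIZE_Y).filter (fun y =>
      PySem.Int.mod (PySem.Int.floordiv x pvBOX_SIZE_X) 2 ==
      PySem.Int.mod (PySem.Int.floordiv y pvBOX_SIZE_Y) 2)).map (fun y => (x, y)))

def get_crop_boxes (size : Int × Int) : List (Int × Int × Int × Int) :=
  let width := size.1
  let height := size.2
  (get_upper_left_corners width height).foldl (fun results lt =>
    results ++ [(lt.1, lt.2, min (lt.1 + pvBOX_SIZE_X) width, min (lt.2 + pvBOX_SIZE_Y) height)]) []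

-- ===== PORT B =====
def get_crop_boxes_alt (size : Int × Int) : List (Int × Int × Int × Int) :=
  let width := size.1
  let height := size.2
  (PySem.List.pyRange 0 width pvBOX_SIZE_X).foldl (fun boxes x =>
    let offset : Int := if PySem.Int.mod (PySem.Int.floordiv x pvBOX_SIZE_X) 2 == 0 then 0 else pvBOX_SIZE_Y
    (PySem.List.pyRange offset height (2 * pvBOX_SIZE_Y)).foldl (fun boxes y =>
      boxes ++ [(x, y, min (x + pvBOX_SIZE_X) width, min (y + pvBOX_SIZE_Y) height)]) boxes) []

-- ===== PRECONDITION & SPEC =====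
def Spec_get_crop_boxes (size : Int × Int) (out : List (Int × Int × Int × Int)) : Prop := out = get_crop_boxes_alt size
instance (size : Int × Int) (out : List (Int × Int × Int × Int)) : Decidable (Spec_get_crop_boxes size out) := by unfold Spec_get_crop_boxes; infer_instance

-- ===== CLAIM (what is proved, stated in full; the proofs are below) =====
def Claim_equal_get_crop_boxes : Prop := ∀ (size : Int × Int), Dom_get_crop_boxes size → Spec_get_crop_boxes size (get_crop_boxes size)

-- ===== LEMMAS AND PROOFS =====

-- evens of List.range
lemma range_filter_even (n : Nat) :
    (List.range n).filter (fun k => k % 2 == 0) = (List.range ((n + 1) / 2)).map (fun j => 2 * j) := by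
  induction n with
  | zero => simp
  | succ n ih =>
    rcases Nat.even_or_odd n with ⟨m, hm⟩ | ⟨m, hm⟩
    · have h1 : (n + 1 + 1) / 2 = (n + 1) / 2 + 1 := by omega
      have h2 : n % 2 = 0 := by omega
      have h3 : 2 * ((n + 1) / 2) = n := by omega
      rw [List.range_succ, List.filter_append, ih, h1, List.range_succ, List.map_append]
      simp [h2, h3]
    · have h1 : (n + 1 + 1) / 2 = (n + 1) / 2 := by omega
      have h2 : n % 2 = 1 := by omega
      rw [List.range_succ, List.filter_append, ih, h1]
      simp [h2]

-- odds of List.range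
lemma range_filter_odd (n : Nat) :
    (List.range n).filter (fun k => k % 2 == 1) = (List.range (n / 2)).map (fun j => 2 * j + 1) := by
  induction n with
  | zero => simp
  | succ n ih =>
    rcases Nat.even_or_odd n with ⟨m, hm⟩ | ⟨m, hm⟩
    · have h1 : (n + 1) / 2 = n / 2 := by omega
      have h2 : n % 2 = 0 := by omega
      rw [List.range_succ, List.filter_append, ih, h1]
      simp [h2]
    · have h1 : (n + 1) / 2 = n / 2 + 1 := by omega
      have h2 : n % 2 = 1 := by omega
      have h3 : 2 * (n / 2) + 1 = n := by omega
      rw [List.range_succ, List.filter_append, ih, h1, List.range_succ, List.map_append]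
      simp [h2, h3]

-- the parity test on a multiple of 200, seen through floordiv/mod, is a Nat parity test
lemma pred_multiple (r : Int) (k : Nat) :
    ((r == PySem.Int.mod (PySem.Int.floordiv (0 + 200 * (k : Int)) 200) 2)) =
      (r == ((k % 2 : Nat) : Int)) := by
  have h1 : PySem.Int.mod (PySem.Int.floordiv (0 + 200 * (k : Int)) 200) 2 = ((k % 2 : Nat) : Int) := by
    rw [PySem.Int.floordiv_eq_ediv_of_pos (by norm_num : (0:Int) < 200),
        PySem.Int.mod_eq_emod_of_pos (by norm_num : (0:Int) < 2)]
    omega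
  rw [h1]

-- the parity-filtered 200-range is exactly the strided 400-range
lemma filter_range_eq (h r : Int) (hr : r = 0 ∨ r = 1) :
    ((PySem.List.pyRange 0 h 200).filter (fun y =>
        r == PySem.Int.mod (PySem.Int.floordiv y 200) 2)) =
      PySem.List.pyRange (if r == 0 then (0 : Int) else 200) h 400 := by
  rw [PySem.List.pyRange_of_pos 0 h (by norm_num : (0:Int) < 200)]
  rw [List.filter_map]
  simp only [Function.comp_def]
  rw [List.filter_congr (fun k _ => pred_multiple r k)]
  rcases hr with hr | hr
  · subst hr
    have hfun : (fun k : Nat => ((0:Int) == ((k % 2 : Nat) : Int))) = (fun k : Nat => k % 2 == 0) := by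
      funext k
      have : k % 2 = 0 ∨ k % 2 = 1 := by omega
      rcases this with h2 | h2 <;> simp [h2]
    rw [hfun, range_filter_even, List.map_map,
        show (if ((0:Int) == 0) = true then (0:Int) else 200) = 0 from rfl,
        PySem.List.pyRange_of_pos 0 h (by norm_num : (0:Int) < 400)]
    have hn : (((if 0 < h then ((h - 0 + 200 - 1) / 200).toNat else 0) + 1) / 2)
        = (if 0 < h then ((h - 0 + 400 - 1) / 400).toNat else 0) := by
      split_ifs with h1 <;> omega
    rw [hn]
    exact List.map_congr_left (fun j _ => by simp; ring)
  · subst hr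
    have hfun : (fun k : Nat => ((1:Int) == ((k % 2 : Nat) : Int))) = (fun k : Nat => k % 2 == 1) := by
      funext k
      have : k % 2 = 0 ∨ k % 2 = 1 := by omega
      rcases this with h2 | h2 <;> simp [h2]
    rw [hfun, range_filter_odd, List.map_map,
        show (if ((1:Int) == 0) = true then (0:Int) else 200) = 200 from rfl,
        PySem.List.pyRange_of_pos 200 h (by norm_num : (0:Int) < 400)]
    have hn : ((if 0 < h then ((h - 0 + 200 - 1) / 200).toNat else 0) / 2)
        = (if 200 < h then ((h - 200 + 400 - 1) / 400).toNat else 0) := by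
      split_ifs with h1 h2 <;> omega
    rw [hn]
    exact List.map_congr_left (fun j _ => by simp; ring)

-- the column parity is 0 or 1
lemma parity01 (x : Int) :
    PySem.Int.mod (PySem.Int.floordiv x 200) 2 = 0 ∨ PySem.Int.mod (PySem.Int.floordiv x 200) 2 = 1 := by
  have h1 := PySem.Int.mod_nonneg (PySem.Int.floordiv x 200) (by norm_num : (0:Int) < 2)
  have h2 := PySem.Int.mod_lt (PySem.Int.floordiv x 200) (by norm_num : (0:Int) < 2)
  omega

-- ===== VERDICT (by name: the statement is the Claim_ definition above) =====
theorem get_crop_boxes_spec : Claim_equal_get_crop_boxes := by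
  intro size _
  unfold Spec_get_crop_boxes get_crop_boxes get_crop_boxes_alt get_upper_left_corners
  obtain ⟨w, h⟩ := size
  simp only [PySem.List.foldl_append_singleton_eq_map]
  rw [List.nil_append, List.map_flatMap, PySem.List.foldl_append_eq_flatMap, List.nil_append]
  apply List.flatMap_congr
  intro x _
  rw [List.map_map]
  rw [show ((PySem.List.pyRange 0 h pvBOX_SIZE_Y).filter (fun y =>
        PySem.Int.mod (PySem.Int.floordiv x pvBOX_SIZE_X) 2 ==
        PySem.Int.mod (PySem.Int.floordiv y pvBOX_SIZE_Y) 2))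
      = ((PySem.List.pyRange 0 h 200).filter (fun y =>
        PySem.Int.mod (PySem.Int.floordiv x 200) 2 ==
        PySem.Int.mod (PySem.Int.floordiv y 200) 2)) from rfl,
      filter_range_eq h (PySem.Int.mod (PySem.Int.floordiv x 200) 2) (parity01 x)]
  rfl
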